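-- pv_equiv track=rewrite | github.com/Ashir1501/CustomAuthApp | blog/views.py | truncate_summary
-- ===== SOURCE A (Python) =====
-- def truncate_summary(summary):
--     len_summary = len(summary.split(' '))
--     if len_summary <= 15:
--         return summary
--     else:
--         lst = summary.split(' ')
--         lst = [lst[i] for i in range(15)]
--         new_summary = ' '.join(lst)
--         return new_summary + '...'
-- ===== SOURCE B (Python) =====
-- def truncate_summary(summary):
--     spaces = 0
--     prefix = []
--     for ch in summary:
--         if ch == ' ':
--             spaces += 1
--             if spaces == 15:
--                 return ''.join(prefix) + '...'
--         prefix.append(ch)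
--     return summary
-- ===== Notes on version B (the rewrite author's own statement) =====
-- stated objective: alternative
-- what changed: B replaces the double split/index-comprehension/join pipeline by a single character scan that counts space separators and cuts the string at the fifteenth one, never materialising the word list; in CPython this trades the fast C split for a Python-level loop, so it is not faster.
import Mathlib
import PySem

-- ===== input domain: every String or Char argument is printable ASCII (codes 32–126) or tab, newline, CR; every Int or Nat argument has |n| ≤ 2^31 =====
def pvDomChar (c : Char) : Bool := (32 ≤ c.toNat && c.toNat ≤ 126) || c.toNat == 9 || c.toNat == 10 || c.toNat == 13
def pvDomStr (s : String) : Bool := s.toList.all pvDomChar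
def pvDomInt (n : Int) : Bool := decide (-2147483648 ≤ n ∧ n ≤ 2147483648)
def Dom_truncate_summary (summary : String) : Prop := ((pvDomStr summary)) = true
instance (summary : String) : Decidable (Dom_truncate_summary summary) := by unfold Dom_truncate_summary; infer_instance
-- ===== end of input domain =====

-- B replaces A's split/comprehension/join pipeline by one character scan that cuts at the 15th space separator (alternative algorithm, no word list built); A is total and equivalence is proved on all inputs.

-- ===== PORT A =====
-- Literal port of A: split on the space character, compare the word count with 15, rebuild the
-- first 15 words with a range comprehension (lst[i] = pyGet?; the .getD []
-- default is never reached: in the else branch 15 < lst.length) and join.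
def truncate_summary (summary : String) : String :=
  let len_summary := (PySem.Chars.splitOn summary.toList [' ']).length
  if len_summary ≤ 15 then summary
  else
    let lst := PySem.Chars.splitOn summary.toList [' ']
    let lst2 := (PySem.List.pyRange 0 15 1).map (fun i => (PySem.List.pyGet? lst i).getD [])
    String.ofList (PySem.Chars.join [' '] lst2 ++ "...".toList)

-- ===== PORT B =====
-- Port of Source B: one pass over the characters, counting spaces and accumulating
-- the prefix; at the 15th space return prefix + '...', else the whole string.
def truncate_summary_altGo : List Char → List Char → Nat → String → String
  | [], _, _, full => full
  | c :: rest, acc, spaces, full =>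
    if c = ' ' then
      if spaces + 1 = 15 then String.ofList (acc ++ "...".toList)
      else truncate_summary_altGo rest (acc ++ [c]) (spaces + 1) full
    else truncate_summary_altGo rest (acc ++ [c]) spaces full

def truncate_summary_alt (summary : String) : String :=
  truncate_summary_altGo summary.toList [] 0 summary

-- ===== PRECONDITION & SPEC =====
def Spec_truncate_summary (summary : String) (out : String) : Prop := out = truncate_summary_alt summary
instance (summary : String) (out : String) : Decidable (Spec_truncate_summary summary out) := by unfold Spec_truncate_summary; infer_instance

-- ===== CLAIM (what is proved, stated in full; the proofs are below) =====
def Claim_equal_truncate_summary : Prop := ∀ (summary : String), Dom_truncate_summary summary → Spec_truncate_summary summary (truncate_summary summary)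

-- ===== LEMMAS AND PROOFS =====

-- simple structural model of Python's split on a single space
def pvSplit : List Char → List (List Char)
  | [] => [[]]
  | c :: rest =>
    if c = ' ' then [] :: pvSplit rest
    else
      match pvSplit rest with
      | [] => [[c]]
      | p :: ps => (c :: p) :: ps

-- the characters strictly before the r-th space
def pvPrefixUpTo : List Char → Nat → List Char
  | [], _ => []
  | c :: rest, r =>
    if c = ' ' then (if r = 1 then [] else ' ' :: pvPrefixUpTo rest (r - 1))
    else c :: pvPrefixUpTo rest r

def pvConsHead (pre : List Char) : List (List Char) → List (List Char)
  | [] => [pre]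
  | p :: ps => (pre ++ p) :: ps

theorem pvSplit_ne_nil (cs : List Char) : pvSplit cs ≠ [] := by
  cases cs with
  | nil => simp [pvSplit]
  | cons c rest =>
    simp only [pvSplit]; split_ifs
    · simp
    · cases h : pvSplit rest <;> simp

theorem pvGo_spec (cs : List Char) : ∀ (fuel : Nat) (cur : List Char) (acc : List (List Char)),
    cs.length < fuel →
    PySem.Chars.splitOn.go [' '] fuel cs cur acc = acc.reverse ++ pvConsHead cur.reverse (pvSplit cs) := by
  induction cs with
  | nil =>
    intro fuel cur acc h
    cases fuel with
    | zero => omega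
    | succ f => simp [PySem.Chars.splitOn.go, pvSplit, pvConsHead]
  | cons c rest ih =>
    intro fuel cur acc h
    cases fuel with
    | zero => simp at h
    | succ f =>
      by_cases hc : c = ' '
      · subst hc
        rw [show PySem.Chars.splitOn.go [' '] (f+1) (' '::rest) cur acc =
            PySem.Chars.splitOn.go [' '] f rest [] (cur.reverse :: acc) from by
          simp [PySem.Chars.splitOn.go, List.isPrefixOf, List.drop]]
        rw [ih f [] (cur.reverse :: acc) (by simpa using Nat.lt_of_succ_lt_succ h)]
        cases hs : pvSplit rest with
        | nil => exact absurd hs (pvSplit_ne_nil rest)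
        | cons p ps => simp [pvSplit, hs, pvConsHead]
      · rw [show PySem.Chars.splitOn.go [' '] (f+1) (c::rest) cur acc =
            PySem.Chars.splitOn.go [' '] f rest (c :: cur) acc from by
          have hc' : (' ' == c) = false := beq_eq_false_iff_ne.mpr (fun h => hc h.symm)
          simp [PySem.Chars.splitOn.go, List.isPrefixOf, hc']]
        rw [ih f (c :: cur) acc (by simpa using Nat.lt_of_succ_lt_succ h)]
        cases hs : pvSplit rest with
        | nil => exact absurd hs (pvSplit_ne_nil rest)
        | cons p ps => simp [pvSplit, hs, pvConsHead, hc]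

theorem pvSplitOn_eq (cs : List Char) : PySem.Chars.splitOn cs [' '] = pvSplit cs := by
  rw [PySem.Chars.splitOn, pvGo_spec cs (cs.length+1) [] [] (by omega)]
  cases hs : pvSplit cs with
  | nil => exact absurd hs (pvSplit_ne_nil cs)
  | cons p ps => simp [pvConsHead]

theorem pvSplit_length (cs : List Char) : (pvSplit cs).length = cs.count ' ' + 1 := by
  induction cs with
  | nil => simp [pvSplit]
  | cons c rest ih =>
    by_cases hc : c = ' '
    · subst hc; simp [pvSplit, List.count_cons, ih]
    · cases hs : pvSplit rest with
      | nil => exact absurd hs (pvSplit_ne_nil rest)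
      | cons p ps =>
        have := ih
        rw [hs] at this
        simp [pvSplit, hc, hs, ← this]

theorem pvComp_take (lst : List (List Char)) (r : Nat) (h : r ≤ lst.length) :
    (PySem.List.pyRange 0 r 1).map (fun i => (PySem.List.pyGet? lst i).getD []) = lst.take r := by
  induction r with
  | zero => simp [PySem.List.pyRange]
  | succ n ih =>
    have hsplit : PySem.List.pyRange 0 (n+1) 1 = PySem.List.pyRange 0 n 1 ++ PySem.List.pyRange n (n+1) 1 := by
      exact_mod_cast PySem.List.pyRange_one_append 0 n (n+1) (by positivity) (by push_cast; omega)
    have hlast : PySem.List.pyRange (n:Int) ((n:Nat)+1 : Int) 1 = [(n:Int)] := by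
      rw [PySem.List.pyRange_one_cons (by omega)]
      norm_num [PySem.List.pyRange]
    have hn : n < lst.length := by omega
    push_cast at hlast hsplit ⊢
    rw [hsplit, hlast, List.map_append, ih (by omega)]
    rw [List.take_add_one]
    simp [PySem.List.pyGet?_natCast, List.getElem?_eq_getElem hn]

theorem pvJoin_head (c : Char) (p : List Char) (ts : List (List Char)) :
    PySem.Chars.join [' '] ((c :: p) :: ts) = c :: PySem.Chars.join [' '] (p :: ts) := by
  cases ts with
  | nil => simp [PySem.Chars.join, List.intercalate]
  | cons t ts' => simp [PySem.Chars.join_cons_cons]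

theorem pvJoin_take (cs : List Char) : ∀ r : Nat, 1 ≤ r → r ≤ cs.count ' ' →
    PySem.Chars.join [' '] ((pvSplit cs).take r) = pvPrefixUpTo cs r := by
  induction cs with
  | nil => intro r h1 h2; simp at h2; omega
  | cons c rest ih =>
    intro r h1 h2
    by_cases hc : c = ' '
    · subst hc
      rw [show pvSplit (' '::rest) = [] :: pvSplit rest from by simp [pvSplit]]
      rw [List.take_cons (by omega)]
      by_cases hr : r = 1
      · subst hr
        simp [PySem.Chars.join, List.intercalate, pvPrefixUpTo]
      · have h2' : r - 1 ≤ rest.count ' ' := by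
          rw [List.count_cons] at h2; simp at h2; omega
        cases ht : (pvSplit rest).take (r-1) with
        | nil =>
          rcases List.take_eq_nil_iff.mp ht with h | h
          · omega
          · exact absurd h (pvSplit_ne_nil rest)
        | cons t ts =>
          rw [PySem.Chars.join_cons_cons]
          have := ih (r-1) (by omega) h2'
          rw [ht] at this
          rw [show pvPrefixUpTo (' '::rest) r = ' ' :: pvPrefixUpTo rest (r-1) from by
            simp [pvPrefixUpTo, hr]]
          simp [this]
    · cases hs : pvSplit rest with
      | nil => exact absurd hs (pvSplit_ne_nil rest)
      | cons p ps =>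
        rw [show pvSplit (c::rest) = (c::p)::ps from by simp [pvSplit, if_neg hc, hs]]
        have hcount : rest.count ' ' = (c::rest).count ' ' := by
          simp [List.count_cons, hc]
        rw [List.take_cons (by omega), pvJoin_head]
        have := ih r h1 (by omega)
        rw [hs, List.take_cons (by omega)] at this
        rw [this]
        simp [pvPrefixUpTo, hc]

theorem pvAltGo_spec (cs : List Char) : ∀ (acc : List Char) (spaces : Nat) (full : String),
    spaces < 15 →
    truncate_summary_altGo cs acc spaces full =
      if cs.count ' ' + spaces < 15 then full
      else String.ofList (acc ++ pvPrefixUpTo cs (15 - spaces) ++ "...".toList) := by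
  induction cs with
  | nil => intro acc spaces full h; simp [truncate_summary_altGo]; omega
  | cons c rest ih =>
    intro acc spaces full h
    by_cases hc : c = ' '
    · subst hc
      by_cases h15 : spaces + 1 = 15
      · rw [show truncate_summary_altGo (' '::rest) acc spaces full =
            String.ofList (acc ++ "...".toList) from by simp [truncate_summary_altGo, h15]]
        have hs14 : spaces = 14 := by omega
        rw [if_neg (by simp [List.count_cons]; omega)]
        simp [pvPrefixUpTo, hs14]
      · rw [show truncate_summary_altGo (' '::rest) acc spaces full =
            truncate_summary_altGo rest (acc ++ [' ']) (spaces+1) full from by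
              simp [truncate_summary_altGo, h15]]
        rw [ih (acc ++ [' ']) (spaces+1) full (by omega)]
        have hcount : (' '::rest).count ' ' = rest.count ' ' + 1 := by simp [List.count_cons]
        rw [show pvPrefixUpTo (' '::rest) (15 - spaces) = ' ' :: pvPrefixUpTo rest (15 - (spaces+1)) from by
          rw [show (15:Nat) - (spaces+1) = 15 - spaces - 1 from by omega]
          simp [pvPrefixUpTo]; omega]
        by_cases hlt : rest.count ' ' + (spaces+1) < 15
        · rw [if_pos hlt, if_pos (by omega)]
        · rw [if_neg hlt, if_neg (by omega)]
          simp
    · rw [show truncate_summary_altGo (c::rest) acc spaces full =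
          truncate_summary_altGo rest (acc ++ [c]) spaces full from by
            simp [truncate_summary_altGo, hc]]
      rw [ih (acc ++ [c]) spaces full h]
      have hcount : (c::rest).count ' ' = rest.count ' ' := by simp [List.count_cons, hc]
      rw [hcount, show pvPrefixUpTo (c::rest) (15 - spaces) = c :: pvPrefixUpTo rest (15 - spaces) from by
        simp [pvPrefixUpTo, hc]]
      by_cases hlt : rest.count ' ' + spaces < 15
      · rw [if_pos hlt, if_pos hlt]
      · rw [if_neg hlt, if_neg hlt]; simp

-- ===== VERDICT (by name: the statement is the Claim_ definition above) =====
theorem truncate_summary_spec : Claim_equal_truncate_summary := by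
  intro summary _
  unfold Spec_truncate_summary truncate_summary truncate_summary_alt
  rw [pvAltGo_spec summary.toList [] 0 summary (by omega)]
  simp only [pvSplitOn_eq, pvSplit_length]
  by_cases hlt : summary.toList.count ' ' + 1 ≤ 15
  · rw [if_pos hlt, if_pos (by omega)]
  · rw [if_neg hlt, if_neg (by omega)]
    have h15 := pvComp_take (pvSplit summary.toList) 15 (by rw [pvSplit_length]; omega)
    norm_num at h15
    rw [h15]
    rw [pvJoin_take summary.toList 15 (by omega) (by omega)]
    simp
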